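-- pv_equiv track=rewrite | github.com/DanielTLouis/HackerRank | DataStructures/Prepare_DataStructures_DisjointSet_ComponentsInAGraph.py | componentsInGraph
-- ===== SOURCE A (Python) =====
-- def componentsInGraph(gb):
--     # Write your code here
--     # Build graph
--     graph = {}
--     for l,r in gb:
--         if l in graph:
--             graph[l].add(r)
--         else: graph[l] = {r}
--         if r in graph:
--             graph[r].add(l)
--         else: graph[r] = {l}
--
--     # find all nodes in each cluster and count the number
--     # of nodes
--     visited = set()
--     cluster = 0 # cluster index
--     counter = [] # number of nodes in cluster
--     for node in graph:
--         if node not in visited: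
--     # if its unvisited node, its a new cluster
--             counter.append(0)
--     # find all nodes in this cluster start with current node
--             stack = [node]
--             while stack:
--     # get the next node in cluster
--                 n = stack.pop()
--                 if n not in visited:
--                     counter[cluster] += 1
--     # mark node as visited
--                     visited.add(n)
--     # add connected nodes to the stack
--                     stack.extend(graph[n].difference(visited))
--     # if node was not visited, it is a new cluster
--             cluster += 1
--     return [min(counter), max(counter)]
-- ===== SOURCE B (Python) =====
-- def componentsInGraph(gb):
--     # Incremental component merging (disjoint-set lists) instead of dict-graph + DFS.
--     comps = []  # disjoint sets of nodes seen so far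
--     for l, r in gb:
--         i = next((k for k, c in enumerate(comps) if l in c), None)
--         j = next((k for k, c in enumerate(comps) if r in c), None)
--         if i is None and j is None:
--             comps.append({l, r})
--         elif i is None:
--             comps[j].add(l)
--         elif j is None:
--             comps[i].add(r)
--         elif i != j:
--             comps[i] |= comps[j]
--             del comps[j]
--     sizes = [len(c) for c in comps]
--     return [min(sizes), max(sizes)]
-- ===== Notes on version B (the rewrite author's own statement) =====
-- stated objective: alternative
-- what changed: Replaces A's adjacency-dict construction plus stack-based DFS over dict keys by a single pass over the edge list that maintains a list of disjoint node sets, merging the two sets an edge connects; component sizes are read off the final sets.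
-- outside the precondition, e.g. on componentsInGraph([]): A raises ValueError, B raises ValueError
import Mathlib
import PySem

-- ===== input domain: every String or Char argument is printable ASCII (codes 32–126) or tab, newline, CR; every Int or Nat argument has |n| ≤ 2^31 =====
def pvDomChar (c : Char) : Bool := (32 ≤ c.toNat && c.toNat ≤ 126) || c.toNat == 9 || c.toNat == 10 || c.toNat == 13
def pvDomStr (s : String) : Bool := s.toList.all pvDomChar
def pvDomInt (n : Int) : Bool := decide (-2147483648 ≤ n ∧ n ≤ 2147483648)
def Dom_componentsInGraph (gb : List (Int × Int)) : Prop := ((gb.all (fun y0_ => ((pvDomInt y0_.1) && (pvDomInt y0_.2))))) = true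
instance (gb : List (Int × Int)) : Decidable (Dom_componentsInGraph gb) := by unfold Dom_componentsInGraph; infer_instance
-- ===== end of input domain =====

-- B replaces A's adjacency-dict + stack DFS by one pass over the edges that merges a list of
-- disjoint node sets; same return value (alternative decomposition, no speed claim).

-- ===== PORT A =====
-- graph = {}; for l,r in gb: graph[l].add(r) / graph[l] = {r}; and symmetrically for r
-- (pvAddNbr is the 'if u in graph: graph[u].add(v) else: graph[u] = {v}' step)
def pvAddNbr (g : PySem.Dict Int (PySem.Set Int)) (u v : Int) : PySem.Dict Int (PySem.Set Int) :=
  match g.get? u with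
  | some s => g.insert u (PySem.Set.add s v)
  | none   => g.insert u (PySem.Set.ofList [v])

def pvBuildGraph (gb : List (Int × Int)) : PySem.Dict Int (PySem.Set Int) :=
  gb.foldl (fun g e => pvAddNbr (pvAddNbr g e.1 e.2) e.2 e.1) PySem.Dict.empty

-- the 'while stack:' loop; fuel-bounded (fuel is proved sufficient below); Python's iteration
-- order over the set graph[n].difference(visited) is unspecified, we use the Set's list order —
-- the returned (visited, counter) pair does not depend on that order.
def pvDfsA (g : PySem.Dict Int (PySem.Set Int)) :
    Nat → List Int → PySem.Set Int → Int → List Int → PySem.Set Int × List Int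
  | 0, _, visited, _, counter => (visited, counter)
  | fuel+1, stack, visited, cluster, counter =>
    match PySem.List.pop? stack (-1) with
    | none => (visited, counter)          -- stack empty: while loop exits
    | some (n, rest) =>
      if PySem.Set.contains visited n then
        pvDfsA g fuel rest visited cluster counter
      else
        -- counter[cluster] += 1
        let counter' := PySem.List.pySetD counter cluster (PySem.List.pyGetD counter cluster 0 + 1)
        let visited' := PySem.Set.add visited n
        match g.get? n with
        | none => (visited', counter')    -- KeyError: unreachable, stack elements are graph keys
        | some nbrs =>
          pvDfsA g fuel (rest ++ PySem.Set.diff nbrs visited') visited' cluster counter'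

-- one iteration of the outer 'for node in graph:' loop
def pvOuterStep (graph : PySem.Dict Int (PySem.Set Int)) (fuel : Nat)
    (st : PySem.Set Int × Int × List Int) (node : Int) : PySem.Set Int × Int × List Int :=
  if PySem.Set.contains st.1 node then st
  else
    let counter := st.2.2 ++ [(0:Int)]
    let r := pvDfsA graph fuel [node] st.1 st.2.1 counter
    (r.1, st.2.1 + 1, r.2)

def componentsInGraph (gb : List (Int × Int)) : List Int :=
  let graph := pvBuildGraph gb
  let fuel := (2 * gb.length + 2) * (2 * gb.length + 2) + 1
  let st := (PySem.Dict.keys graph).foldl (pvOuterStep graph fuel)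
    (PySem.Set.empty, (0:Int), ([] : List Int))
  match PySem.List.min? st.2.2 (fun x => x), PySem.List.max? st.2.2 (fun x => x) with
  | some mn, some mx => [mn, mx]
  | _, _ => []                            -- min([]) raises ValueError: excluded by Pre_

-- ===== PORT B =====
def pvFindComp (comps : List (PySem.Set Int)) (x : Int) : Option Nat :=
  comps.findIdx? (fun c => PySem.Set.contains c x)

def pvMergeEdge (comps : List (PySem.Set Int)) (e : Int × Int) : List (PySem.Set Int) :=
  match pvFindComp comps e.1, pvFindComp comps e.2 with
  | none, none   => comps ++ [PySem.Set.ofList [e.1, e.2]]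
  | none, some j => comps.modify j (fun c => PySem.Set.add c e.1)
  | some i, none => comps.modify i (fun c => PySem.Set.add c e.2)
  | some i, some j =>
    if i = j then comps
    else
      let cj := (comps[j]?).getD []
      (comps.modify i (fun c => PySem.Set.union c cj)).eraseIdx j

def componentsInGraph_alt (gb : List (Int × Int)) : List Int :=
  let comps := gb.foldl pvMergeEdge []
  let sizes := comps.map (fun c => (PySem.Set.len c : Int))
  match PySem.List.min? sizes (fun x => x) with
  | none => []                            -- min([]) raises ValueError: excluded by Pre_
  | some mn =>
    match PySem.List.max? sizes (fun x => x) with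
    | none => []
    | some mx => [mn, mx]

-- ===== PRECONDITION & SPEC =====
-- On gb = [] both Pythons raise ValueError (min of an empty sequence); that is the only exclusion.
def Pre_componentsInGraph (gb : List (Int × Int)) : Prop := gb ≠ []
instance (gb : List (Int × Int)) : Decidable (Pre_componentsInGraph gb) := by
  unfold Pre_componentsInGraph; infer_instance
def pvWitness_componentsInGraph : (List (Int × Int)) := [(1, 2), (3, 3)]

def Spec_componentsInGraph (gb : List (Int × Int)) (out : List Int) : Prop := out = componentsInGraph_alt gb
instance (gb : List (Int × Int)) (out : List Int) : Decidable (Spec_componentsInGraph gb out) := by unfold Spec_componentsInGraph; infer_instance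

-- ===== CLAIM (what is proved, stated in full; the proofs are below) =====
def Claim_equal_componentsInGraph : Prop := ∀ (gb : List (Int × Int)), Dom_componentsInGraph gb → Pre_componentsInGraph gb → Spec_componentsInGraph gb (componentsInGraph gb)

-- ===== LEMMAS AND PROOFS =====

-- undirected adjacency and connectivity generated by the edge list
def pvE (gb : List (Int × Int)) (x y : Int) : Prop := (x, y) ∈ gb ∨ (y, x) ∈ gb
def pvC (gb : List (Int × Int)) : Int → Int → Prop := Relation.ReflTransGen (pvE gb)
def pvNodes (gb : List (Int × Int)) : Finset Int := (gb.flatMap (fun e => [e.1, e.2])).toFinset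
noncomputable def pvComp (gb : List (Int × Int)) (x : Int) : Finset Int :=
  @Finset.filter Int (fun y => pvC gb x y) (Classical.decPred _) (pvNodes gb)
-- L lists each connected component of gb exactly once
def pvClassList (gb : List (Int × Int)) (L : List (Finset Int)) : Prop :=
  L.Nodup ∧ (∀ c ∈ L, ∃ x, x ∈ pvNodes gb ∧ c = pvComp gb x) ∧
    (∀ x ∈ pvNodes gb, pvComp gb x ∈ L)

lemma pvE_symm (gb : List (Int × Int)) : Symmetric (pvE gb) := by
  intro x y h; exact h.symm

lemma pvC_symm {gb : List (Int × Int)} {x y : Int} (h : pvC gb x y) : pvC gb y x :=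
  Relation.ReflTransGen.symmetric (pvE_symm gb) h

lemma pvC_trans {gb : List (Int × Int)} {x y z : Int}
    (h1 : pvC gb x y) (h2 : pvC gb y z) : pvC gb x z := h1.trans h2

lemma pvE_mem_left {gb : List (Int × Int)} {x y : Int} (h : pvE gb x y) : x ∈ pvNodes gb := by
  simp only [pvNodes, List.mem_toFinset, List.mem_flatMap]
  rcases h with h | h
  · exact ⟨(x, y), h, by simp⟩
  · exact ⟨(y, x), h, by simp⟩

lemma pvE_mem_right {gb : List (Int × Int)} {x y : Int} (h : pvE gb x y) : y ∈ pvNodes gb :=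
  pvE_mem_left (pvE_symm gb h)

lemma pvC_mem {gb : List (Int × Int)} {x y : Int} (h : pvC gb x y) :
    x = y ∨ (x ∈ pvNodes gb ∧ y ∈ pvNodes gb) := by
  induction h with
  | refl => exact Or.inl rfl
  | tail _ hE ih =>
    rcases ih with rfl | ⟨hx, _⟩
    · exact Or.inr ⟨pvE_mem_left hE, pvE_mem_right hE⟩
    · exact Or.inr ⟨hx, pvE_mem_right hE⟩

lemma mem_pvComp {gb : List (Int × Int)} {x y : Int} :
    y ∈ pvComp gb x ↔ y ∈ pvNodes gb ∧ pvC gb x y := by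
  simp [pvComp, Finset.mem_filter]

lemma self_mem_pvComp {gb : List (Int × Int)} {x : Int} (h : x ∈ pvNodes gb) :
    x ∈ pvComp gb x := mem_pvComp.2 ⟨h, Relation.ReflTransGen.refl⟩

lemma pvComp_eq_of_C {gb : List (Int × Int)} {x y : Int} (h : pvC gb x y) :
    pvComp gb x = pvComp gb y := by
  ext z
  simp only [mem_pvComp]
  exact ⟨fun ⟨hz, hc⟩ => ⟨hz, pvC_trans (pvC_symm h) hc⟩,
         fun ⟨hz, hc⟩ => ⟨hz, pvC_trans h hc⟩⟩

lemma pvComp_subset_nodes {gb : List (Int × Int)} {x : Int} :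
    pvComp gb x ⊆ pvNodes gb := fun y hy => (mem_pvComp.1 hy).1

-- two component lists of the same graph are permutations of each other
lemma pvClassList_perm {gb : List (Int × Int)} {L1 L2 : List (Finset Int)}
    (h1 : pvClassList gb L1) (h2 : pvClassList gb L2) : L1.Perm L2 := by
  rw [List.perm_ext_iff_of_nodup h1.1 h2.1]
  intro c
  constructor
  · intro hc; obtain ⟨x, hx, rfl⟩ := h1.2.1 c hc; exact h2.2.2 x hx
  · intro hc; obtain ⟨x, hx, rfl⟩ := h2.2.1 c hc; exact h1.2.2 x hx

-- min/max of a list depend only on its multiset of elements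
lemma pvFoldlMin_perm {x y : Int} {t s : List Int} (h : (x :: t).Perm (y :: s)) :
    t.foldl min x = s.foldl min y := by
  have h1 := List.Perm.foldl_op_eq (op := min) (a := x) h
  have h2 := List.Perm.foldl_op_eq (op := min) (a := y) h.symm
  rw [List.foldl_cons, List.foldl_cons, min_self, List.foldl_assoc] at h1
  rw [List.foldl_cons, List.foldl_cons, min_self, List.foldl_assoc] at h2
  exact le_antisymm (h1 ▸ min_le_right _ _) (h2 ▸ min_le_right _ _)

lemma pvFoldlMax_perm {x y : Int} {t s : List Int} (h : (x :: t).Perm (y :: s)) :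
    t.foldl max x = s.foldl max y := by
  have h1 := List.Perm.foldl_op_eq (op := max) (a := x) h
  have h2 := List.Perm.foldl_op_eq (op := max) (a := y) h.symm
  rw [List.foldl_cons, List.foldl_cons, max_self, List.foldl_assoc] at h1
  rw [List.foldl_cons, List.foldl_cons, max_self, List.foldl_assoc] at h2
  exact le_antisymm (h2 ▸ le_max_right _ _) (h1 ▸ le_max_right _ _)

lemma pvMin?_perm {c s : List Int} (h : c.Perm s) :
    PySem.List.min? c (fun x => x) = PySem.List.min? s (fun x => x) := by
  cases c with
  | nil => cases s with
    | nil => rfl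
    | cons y s => exact absurd h.length_eq (by simp)
  | cons x t => cases s with
    | nil => exact absurd h.length_eq (by simp)
    | cons y s =>
      rw [PySem.List.min?_id_cons, PySem.List.min?_id_cons, pvFoldlMin_perm h]

lemma pvMax?_perm {c s : List Int} (h : c.Perm s) :
    PySem.List.max? c (fun x => x) = PySem.List.max? s (fun x => x) := by
  cases c with
  | nil => cases s with
    | nil => rfl
    | cons y s => exact absurd h.length_eq (by simp)
  | cons x t => cases s with
    | nil => exact absurd h.length_eq (by simp)
    | cons y s =>
      rw [PySem.List.max?_id_cons, PySem.List.max?_id_cons, pvFoldlMax_perm h]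

-- edge-list extension lemmas for connectivity
lemma pvE_append {l : List (Int × Int)} {a b u v : Int} :
    pvE (l ++ [(a, b)]) u v ↔ pvE l u v ∨ (u = a ∧ v = b) ∨ (u = b ∧ v = a) := by
  simp only [pvE, List.mem_append, List.mem_singleton, Prod.mk.injEq]
  tauto

lemma pvC_mono {l : List (Int × Int)} {a b x y : Int} (h : pvC l x y) :
    pvC (l ++ [(a, b)]) x y :=
  Relation.ReflTransGen.mono (fun _ _ huv => pvE_append.2 (Or.inl huv)) h

lemma pvC_edge {l : List (Int × Int)} (a b : Int) : pvC (l ++ [(a, b)]) a b :=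
  Relation.ReflTransGen.single (pvE_append.2 (Or.inr (Or.inl ⟨rfl, rfl⟩)))

lemma pvC_append {l : List (Int × Int)} {a b x y : Int} :
    pvC (l ++ [(a, b)]) x y ↔
      pvC l x y ∨ (pvC l x a ∧ pvC l b y) ∨ (pvC l x b ∧ pvC l a y) := by
  constructor
  · intro h
    induction h with
    | refl => exact Or.inl Relation.ReflTransGen.refl
    | tail _ hE ih =>
      rcases pvE_append.1 hE with hE' | ⟨rfl, rfl⟩ | ⟨rfl, rfl⟩
      · rcases ih with h | ⟨h1, h2⟩ | ⟨h1, h2⟩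
        · exact Or.inl (h.tail hE')
        · exact Or.inr (Or.inl ⟨h1, h2.tail hE'⟩)
        · exact Or.inr (Or.inr ⟨h1, h2.tail hE'⟩)
      · rcases ih with h | ⟨h1, h2⟩ | ⟨h1, h2⟩
        · exact Or.inr (Or.inl ⟨h, Relation.ReflTransGen.refl⟩)
        · exact Or.inr (Or.inl ⟨h1, Relation.ReflTransGen.refl⟩)
        · exact Or.inl h1
      · rcases ih with h | ⟨h1, h2⟩ | ⟨h1, h2⟩
        · exact Or.inr (Or.inr ⟨h, Relation.ReflTransGen.refl⟩)
        · exact Or.inl h1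
        · exact Or.inr (Or.inr ⟨h1, Relation.ReflTransGen.refl⟩)
  · intro h
    have hab : pvC (l ++ [(a, b)]) a b := pvC_edge a b
    rcases h with h | ⟨h1, h2⟩ | ⟨h1, h2⟩
    · exact pvC_mono h
    · exact ((pvC_mono h1).trans hab).trans (pvC_mono h2)
    · exact ((pvC_mono h1).trans (pvC_symm hab)).trans (pvC_mono h2)

lemma pvC_of_not_node {l : List (Int × Int)} {a y : Int} (ha : a ∉ pvNodes l)
    (h : pvC l a y) : y = a := by
  induction h with
  | refl => rfl
  | tail _ hE ih => exact absurd (ih ▸ pvE_mem_left hE) ha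

lemma pvNodes_append {l : List (Int × Int)} {a b x : Int} :
    x ∈ pvNodes (l ++ [(a, b)]) ↔ x ∈ pvNodes l ∨ x = a ∨ x = b := by
  simp only [pvNodes, List.mem_toFinset, List.mem_flatMap, List.mem_append,
    List.mem_singleton]
  constructor
  · rintro ⟨e, he | he2, hx⟩
    · exact Or.inl ⟨e, he, hx⟩
    · subst he2
      simp only [List.mem_cons, List.not_mem_nil, or_false] at hx
      tauto
  · rintro (⟨e, he, hx⟩ | h | h)
    · exact ⟨e, Or.inl he, hx⟩
    · exact ⟨(a, b), Or.inr rfl, by simp [h]⟩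
    · exact ⟨(a, b), Or.inr rfl, by simp [h]⟩

-- the invariant maintained by B's fold: comps are the nonempty, pairwise disjoint
-- connected components of the edges processed so far
def pvBInv (gb : List (Int × Int)) (comps : List (PySem.Set Int)) : Prop :=
  (∀ (i : Nat) (hi : i < comps.length),
      comps[i] ≠ [] ∧ comps[i].Nodup ∧ ∀ x ∈ comps[i], comps[i].toFinset = pvComp gb x) ∧
  (∀ x ∈ pvNodes gb, ∃ (i : Nat) (hi : i < comps.length), x ∈ comps[i]) ∧
  (∀ (i j : Nat) (hi : i < comps.length) (hj : j < comps.length), i ≠ j →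
      ∀ x, x ∈ comps[i] → x ∉ comps[j])

lemma pvBInv_mem_nodes {gb : List (Int × Int)} {comps : List (PySem.Set Int)}
    (hInv : pvBInv gb comps) {i : Nat} (hi : i < comps.length) {x : Int}
    (hx : x ∈ comps[i]) : x ∈ pvNodes gb := by
  have h := (hInv.1 i hi).2.2 x hx
  have : x ∈ comps[i].toFinset := List.mem_toFinset.2 hx
  rw [h] at this
  exact pvComp_subset_nodes this

lemma pvBInv_conn {gb : List (Int × Int)} {comps : List (PySem.Set Int)}
    (hInv : pvBInv gb comps) {i : Nat} (hi : i < comps.length) {x y : Int}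
    (hx : x ∈ comps[i]) (hy : y ∈ comps[i]) : pvC gb x y := by
  have h := (hInv.1 i hi).2.2 x hx
  have : y ∈ comps[i].toFinset := List.mem_toFinset.2 hy
  rw [h] at this
  exact (mem_pvComp.1 this).2

lemma pvBInv_closed {gb : List (Int × Int)} {comps : List (PySem.Set Int)}
    (hInv : pvBInv gb comps) {i : Nat} (hi : i < comps.length) {x y : Int}
    (hx : x ∈ comps[i]) (hyN : y ∈ pvNodes gb) (hxy : pvC gb x y) : y ∈ comps[i] := by
  have h := (hInv.1 i hi).2.2 x hx
  have : y ∈ comps[i].toFinset := by rw [h]; exact mem_pvComp.2 ⟨hyN, hxy⟩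
  exact List.mem_toFinset.1 this

lemma pvFindComp_none {comps : List (PySem.Set Int)} {x : Int}
    (h : pvFindComp comps x = none) {i : Nat} (hi : i < comps.length) : x ∉ comps[i] := by
  intro hx
  have := List.findIdx?_eq_none_iff.1 h comps[i] (comps.getElem_mem hi)
  rw [PySem.Set.contains_eq_listContains] at this
  simp only [List.contains_eq_mem, decide_eq_false_iff_not] at this
  exact this hx

lemma pvFindComp_some {comps : List (PySem.Set Int)} {x : Int} {i : Nat}
    (h : pvFindComp comps x = some i) : ∃ hi : i < comps.length, x ∈ comps[i] := by
  obtain ⟨hi, hp, -⟩ := List.findIdx?_eq_some_iff_getElem.1 h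
  exact ⟨hi, (PySem.Set.contains_iff _ _).1 hp⟩

lemma pvBInv_not_node {gb : List (Int × Int)} {comps : List (PySem.Set Int)}
    (hInv : pvBInv gb comps) {x : Int} (h : pvFindComp comps x = none) :
    x ∉ pvNodes gb := by
  intro hx
  obtain ⟨i, hi, hxi⟩ := hInv.2.1 x hx
  exact pvFindComp_none h hi hxi

lemma pvC_not_to_nonnode {l : List (Int × Int)} {x a : Int} (hx : x ∈ pvNodes l)
    (ha : a ∉ pvNodes l) : ¬ pvC l x a := by
  intro h
  rcases pvC_mem h with rfl | ⟨-, h2⟩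
  · exact ha hx
  · exact ha h2

-- how one appended edge (a, b) changes a component, in the four possible situations
lemma pvComp_append_of_not_conn {l : List (Int × Int)} {a b x : Int}
    (hx : x ∈ pvNodes l) (hna : ¬ pvC l x a) (hnb : ¬ pvC l x b) :
    pvComp (l ++ [(a, b)]) x = pvComp l x := by
  ext y
  simp only [mem_pvComp, pvC_append, pvNodes_append]
  constructor
  · rintro ⟨hyN, hC | ⟨h1, h2⟩ | ⟨h1, h2⟩⟩
    · refine ⟨?_, hC⟩
      rcases pvC_mem hC with rfl | ⟨-, h⟩
      · exact hx
      · exact h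
    · exact absurd h1 hna
    · exact absurd h1 hnb
  · rintro ⟨hyN, hC⟩
    exact ⟨Or.inl hyN, Or.inl hC⟩

lemma pvComp_append_both_new {l : List (Int × Int)} {a b : Int}
    (ha : a ∉ pvNodes l) (hb : b ∉ pvNodes l) :
    pvComp (l ++ [(a, b)]) a = {a, b} := by
  ext y
  simp only [mem_pvComp, pvC_append, pvNodes_append, Finset.mem_insert, Finset.mem_singleton]
  constructor
  · rintro ⟨hyN, hC | ⟨h1, h2⟩ | ⟨h1, h2⟩⟩
    · exact Or.inl (pvC_of_not_node ha hC)
    · exact Or.inr (pvC_of_not_node hb h2)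
    · exact Or.inl (pvC_of_not_node ha h2)
  · rintro (rfl | rfl)
    · exact ⟨Or.inr (Or.inl rfl), Or.inl Relation.ReflTransGen.refl⟩
    · exact ⟨Or.inr (Or.inr rfl),
        Or.inr (Or.inl ⟨Relation.ReflTransGen.refl, Relation.ReflTransGen.refl⟩)⟩

lemma pvComp_append_new_old {l : List (Int × Int)} {a b : Int}
    (ha : a ∉ pvNodes l) (hb : b ∈ pvNodes l) :
    pvComp (l ++ [(a, b)]) b = insert a (pvComp l b) := by
  ext y
  simp only [mem_pvComp, pvC_append, pvNodes_append, Finset.mem_insert, mem_pvComp]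
  constructor
  · rintro ⟨hyN, hC | ⟨h1, h2⟩ | ⟨h1, h2⟩⟩
    · refine Or.inr ⟨?_, hC⟩
      rcases pvC_mem hC with rfl | ⟨-, h⟩
      · exact hb
      · exact h
    · exact absurd h1 (pvC_not_to_nonnode hb ha)
    · exact Or.inl (pvC_of_not_node ha h2)
  · rintro (rfl | ⟨hy, hC⟩)
    · exact ⟨Or.inr (Or.inl rfl),
        Or.inr (Or.inr ⟨Relation.ReflTransGen.refl, Relation.ReflTransGen.refl⟩)⟩
    · exact ⟨Or.inl hy, Or.inl hC⟩

lemma pvComp_append_old_new {l : List (Int × Int)} {a b : Int}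
    (ha : a ∈ pvNodes l) (hb : b ∉ pvNodes l) :
    pvComp (l ++ [(a, b)]) a = insert b (pvComp l a) := by
  ext y
  simp only [mem_pvComp, pvC_append, pvNodes_append, Finset.mem_insert, mem_pvComp]
  constructor
  · rintro ⟨hyN, hC | ⟨h1, h2⟩ | ⟨h1, h2⟩⟩
    · refine Or.inr ⟨?_, hC⟩
      rcases pvC_mem hC with rfl | ⟨-, h⟩
      · exact ha
      · exact h
    · exact Or.inl (pvC_of_not_node hb h2)
    · exact absurd h1 (pvC_not_to_nonnode ha hb)
  · rintro (rfl | ⟨hy, hC⟩)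
    · exact ⟨Or.inr (Or.inr rfl),
        Or.inr (Or.inl ⟨Relation.ReflTransGen.refl, Relation.ReflTransGen.refl⟩)⟩
    · exact ⟨Or.inl hy, Or.inl hC⟩

lemma pvComp_append_merge {l : List (Int × Int)} {a b : Int}
    (ha : a ∈ pvNodes l) (hb : b ∈ pvNodes l) :
    pvComp (l ++ [(a, b)]) a = pvComp l a ∪ pvComp l b := by
  ext y
  simp only [mem_pvComp, pvC_append, pvNodes_append, Finset.mem_union, mem_pvComp]
  constructor
  · rintro ⟨hyN, hC⟩
    have hyN' : y ∈ pvNodes l := by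
      rcases hyN with h | rfl | rfl
      · exact h
      · exact ha
      · exact hb
    rcases hC with hC | ⟨h1, h2⟩ | ⟨h1, h2⟩
    · exact Or.inl ⟨hyN', hC⟩
    · exact Or.inr ⟨hyN', h2⟩
    · exact Or.inl ⟨hyN', h2⟩
  · rintro (⟨hy, hC⟩ | ⟨hy, hC⟩)
    · exact ⟨Or.inl hy, Or.inl hC⟩
    · exact ⟨Or.inl hy, Or.inr (Or.inl ⟨Relation.ReflTransGen.refl, hC⟩)⟩

lemma pvComp_append_conn {l : List (Int × Int)} {a b : Int}
    (ha : a ∈ pvNodes l) (hb : b ∈ pvNodes l) (hab : pvC l a b) (x : Int) :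
    pvComp (l ++ [(a, b)]) x = pvComp l x := by
  ext y
  simp only [mem_pvComp, pvC_append, pvNodes_append]
  constructor
  · rintro ⟨hyN, hC⟩
    have hyN' : y ∈ pvNodes l := by
      rcases hyN with h | rfl | rfl
      · exact h
      · exact ha
      · exact hb
    rcases hC with hC | ⟨h1, h2⟩ | ⟨h1, h2⟩
    · exact ⟨hyN', hC⟩
    · exact ⟨hyN', (h1.trans hab).trans h2⟩
    · exact ⟨hyN', (h1.trans (pvC_symm hab)).trans h2⟩
  · rintro ⟨hyN, hC⟩
    exact ⟨Or.inl hyN, Or.inl hC⟩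

-- one merge step preserves the invariant
lemma pvMergeEdge_inv {l : List (Int × Int)} {comps : List (PySem.Set Int)} {a b : Int}
    (hInv : pvBInv l comps) : pvBInv (l ++ [(a, b)]) (pvMergeEdge comps (a, b)) := by
  obtain ⟨hsets, hcover, hdisj⟩ := hInv
  have hInv' : pvBInv l comps := ⟨hsets, hcover, hdisj⟩
  rcases hfa : pvFindComp comps a with - | i <;> rcases hfb : pvFindComp comps b with - | j
  · -- both endpoints new: append the fresh component {a, b}
    have hme : pvMergeEdge comps (a, b) = comps ++ [PySem.Set.ofList [a, b]] := by
      simp [pvMergeEdge, hfa, hfb]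
    rw [hme]
    have ha : a ∉ pvNodes l := pvBInv_not_node hInv' hfa
    have hb : b ∉ pvNodes l := pvBInv_not_node hInv' hfb
    have hmemS : ∀ x : Int, x ∈ PySem.Set.ofList [a, b] ↔ x = a ∨ x = b := by
      intro x; rw [PySem.Set.mem_ofList]; simp
    have htf : (PySem.Set.ofList [a, b]).toFinset = ({a, b} : Finset Int) := by
      ext z; simp [hmemS z]
    have hgetS : ∀ (hk : comps.length < (comps ++ [PySem.Set.ofList [a, b]]).length),
        (comps ++ [PySem.Set.ofList [a, b]])[comps.length] = PySem.Set.ofList [a, b] := by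
      intro hk; simp
    refine ⟨?_, ?_, ?_⟩
    · intro k hk
      rw [List.length_append, List.length_singleton] at hk
      by_cases hkl : k < comps.length
      · rw [List.getElem_append_left hkl]
        obtain ⟨h1, h2, h3⟩ := hsets k hkl
        refine ⟨h1, h2, fun x hx => ?_⟩
        rw [h3 x hx]
        have hxN := pvBInv_mem_nodes hInv' hkl hx
        exact (pvComp_append_of_not_conn hxN (pvC_not_to_nonnode hxN ha)
          (pvC_not_to_nonnode hxN hb)).symm
      · have hk1 : k = comps.length := by omega
        subst hk1
        rw [hgetS (by simp)]
        refine ⟨?_, PySem.Set.nodup_ofList _, ?_⟩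
        · intro hnil
          have : a ∈ PySem.Set.ofList [a, b] := (hmemS a).2 (Or.inl rfl)
          rw [hnil] at this
          exact absurd this (List.not_mem_nil)
        · intro x hx
          rw [htf]
          rcases (hmemS x).1 hx with h | h
          · rw [h]; exact (pvComp_append_both_new ha hb).symm
          · rw [h, ← pvComp_eq_of_C (pvC_edge a b)]
            exact (pvComp_append_both_new ha hb).symm
    · intro x hx
      rcases pvNodes_append.1 hx with hxN | rfl | rfl
      · obtain ⟨i0, hi0, hxi⟩ := hcover x hxN
        refine ⟨i0, by simp; omega, ?_⟩
        rw [List.getElem_append_left hi0]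
        exact hxi
      · exact ⟨comps.length, by simp, by rw [hgetS (by simp)]; exact (hmemS x).2 (Or.inl rfl)⟩
      · exact ⟨comps.length, by simp, by rw [hgetS (by simp)]; exact (hmemS x).2 (Or.inr rfl)⟩
    · intro k1 k2 hk1 hk2 hne x hx1 hx2
      rw [List.length_append, List.length_singleton] at hk1 hk2
      by_cases h1 : k1 < comps.length <;> by_cases h2 : k2 < comps.length
      · rw [List.getElem_append_left h1] at hx1
        rw [List.getElem_append_left h2] at hx2
        exact hdisj k1 k2 h1 h2 hne x hx1 hx2
      · have : k2 = comps.length := by omega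
        subst this
        rw [hgetS (by simp)] at hx2
        rw [List.getElem_append_left h1] at hx1
        have hxN := pvBInv_mem_nodes hInv' h1 hx1
        rcases (hmemS x).1 hx2 with rfl | rfl
        · exact ha hxN
        · exact hb hxN
      · have : k1 = comps.length := by omega
        subst this
        rw [hgetS (by simp)] at hx1
        rw [List.getElem_append_left h2] at hx2
        have hxN := pvBInv_mem_nodes hInv' h2 hx2
        rcases (hmemS x).1 hx1 with rfl | rfl
        · exact ha hxN
        · exact hb hxN
      · omega
  · -- a new, b in component j: add a to component j
    have hme : pvMergeEdge comps (a, b) = comps.modify j (fun c => PySem.Set.add c a) := by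
      simp [pvMergeEdge, hfa, hfb]
    rw [hme]
    have ha : a ∉ pvNodes l := pvBInv_not_node hInv' hfa
    obtain ⟨hj, hbj⟩ := pvFindComp_some hfb
    have hbN : b ∈ pvNodes l := pvBInv_mem_nodes hInv' hj hbj
    have hcb' : pvComp (l ++ [(a, b)]) b = insert a (pvComp l b) := pvComp_append_new_old ha hbN
    have hmem' : ∀ (k : Nat) (hk : k < (comps.modify j (fun c => PySem.Set.add c a)).length)
        (x : Int), x ∈ (comps.modify j (fun c => PySem.Set.add c a))[k] →
        x ∈ comps[k]'(by rw [List.length_modify] at hk; exact hk) ∨ (j = k ∧ x = a) := by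
      intro k hk x hx
      rw [List.getElem_modify] at hx
      split at hx
      · rcases (PySem.Set.mem_add _ _ _).1 hx with h | rfl
        · exact Or.inl h
        · exact Or.inr ⟨by assumption, rfl⟩
      · exact Or.inl hx
    refine ⟨?_, ?_, ?_⟩
    · intro k hk
      have hk' : k < comps.length := by rw [List.length_modify] at hk; exact hk
      rw [List.getElem_modify]
      by_cases hjk : j = k
      · subst hjk
        rw [if_pos rfl]
        obtain ⟨h1, h2, h3⟩ := hsets j hj
        refine ⟨?_, PySem.Set.nodup_add _ _ h2, ?_⟩
        · intro hnil
          have : b ∈ PySem.Set.add comps[j] a := (PySem.Set.mem_add _ _ _).2 (Or.inl hbj)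
          rw [hnil] at this
          exact absurd this (List.not_mem_nil)
        · intro x hx
          have htfa : (PySem.Set.add comps[j] a).toFinset = insert a comps[j].toFinset := by
            ext z; simp [PySem.Set.mem_add]; tauto
          have hcompb : comps[j].toFinset = pvComp l b := h3 b hbj
          rcases (PySem.Set.mem_add _ _ _).1 hx with hxc | h
          · have hxb : pvC l x b := pvBInv_conn hInv' hj hxc hbj
            rw [htfa, hcompb, ← hcb', pvComp_eq_of_C (pvC_mono hxb)]
          · rw [h, htfa, hcompb, ← hcb', pvComp_eq_of_C (pvC_edge a b)]
      · rw [if_neg hjk]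
        obtain ⟨h1, h2, h3⟩ := hsets k hk'
        refine ⟨h1, h2, fun x hx => ?_⟩
        rw [h3 x hx]
        have hxN := pvBInv_mem_nodes hInv' hk' hx
        have hnb : ¬ pvC l x b := by
          intro hC
          exact hdisj k j hk' hj (fun h => hjk h.symm) b
            (pvBInv_closed hInv' hk' hx hbN hC) hbj
        exact (pvComp_append_of_not_conn hxN (pvC_not_to_nonnode hxN ha) hnb).symm
    · intro x hx
      rcases pvNodes_append.1 hx with hxN | rfl | rfl
      · obtain ⟨i0, hi0, hxi⟩ := hcover x hxN
        refine ⟨i0, by rw [List.length_modify]; exact hi0, ?_⟩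
        rw [List.getElem_modify]
        split
        · exact (PySem.Set.mem_add _ _ _).2 (Or.inl hxi)
        · exact hxi
      · refine ⟨j, by rw [List.length_modify]; exact hj, ?_⟩
        rw [List.getElem_modify, if_pos rfl]
        exact (PySem.Set.mem_add _ _ _).2 (Or.inr rfl)
      · refine ⟨j, by rw [List.length_modify]; exact hj, ?_⟩
        rw [List.getElem_modify, if_pos rfl]
        exact (PySem.Set.mem_add _ _ _).2 (Or.inl hbj)
    · intro k1 k2 hk1 hk2 hne x hx1 hx2
      have hl1 : k1 < comps.length := by rw [List.length_modify] at hk1; exact hk1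
      have hl2 : k2 < comps.length := by rw [List.length_modify] at hk2; exact hk2
      rcases hmem' k1 hk1 x hx1 with hx1' | ⟨rfl, rfl⟩
      · rcases hmem' k2 hk2 x hx2 with hx2' | ⟨rfl, rfl⟩
        · exact hdisj k1 k2 hl1 hl2 hne x hx1' hx2'
        · exact ha (pvBInv_mem_nodes hInv' hl1 hx1')
      · rcases hmem' k2 hk2 x hx2 with hx2' | ⟨h, -⟩
        · exact ha (pvBInv_mem_nodes hInv' hl2 hx2')
        · exact hne (h ▸ rfl)
  · -- b new, a in component i: add b to component i
    have hme : pvMergeEdge comps (a, b) = comps.modify i (fun c => PySem.Set.add c b) := by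
      simp [pvMergeEdge, hfa, hfb]
    rw [hme]
    have hb : b ∉ pvNodes l := pvBInv_not_node hInv' hfb
    obtain ⟨hi, hai⟩ := pvFindComp_some hfa
    have haN : a ∈ pvNodes l := pvBInv_mem_nodes hInv' hi hai
    have hca' : pvComp (l ++ [(a, b)]) a = insert b (pvComp l a) := pvComp_append_old_new haN hb
    have hmem' : ∀ (k : Nat) (hk : k < (comps.modify i (fun c => PySem.Set.add c b)).length)
        (x : Int), x ∈ (comps.modify i (fun c => PySem.Set.add c b))[k] →
        x ∈ comps[k]'(by rw [List.length_modify] at hk; exact hk) ∨ (i = k ∧ x = b) := by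
      intro k hk x hx
      rw [List.getElem_modify] at hx
      split at hx
      · rcases (PySem.Set.mem_add _ _ _).1 hx with h | rfl
        · exact Or.inl h
        · exact Or.inr ⟨by assumption, rfl⟩
      · exact Or.inl hx
    refine ⟨?_, ?_, ?_⟩
    · intro k hk
      have hk' : k < comps.length := by rw [List.length_modify] at hk; exact hk
      rw [List.getElem_modify]
      by_cases hik : i = k
      · subst hik
        rw [if_pos rfl]
        obtain ⟨h1, h2, h3⟩ := hsets i hi
        refine ⟨?_, PySem.Set.nodup_add _ _ h2, ?_⟩
        · intro hnil
          have : a ∈ PySem.Set.add comps[i] b := (PySem.Set.mem_add _ _ _).2 (Or.inl hai)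
          rw [hnil] at this
          exact absurd this (List.not_mem_nil)
        · intro x hx
          have htfb : (PySem.Set.add comps[i] b).toFinset = insert b comps[i].toFinset := by
            ext z; simp [PySem.Set.mem_add]; tauto
          have hcompa : comps[i].toFinset = pvComp l a := h3 a hai
          rcases (PySem.Set.mem_add _ _ _).1 hx with hxc | h
          · have hxa : pvC l x a := pvBInv_conn hInv' hi hxc hai
            rw [htfb, hcompa, ← hca', pvComp_eq_of_C (pvC_mono hxa)]
          · rw [h, htfb, hcompa, ← hca', pvComp_eq_of_C (pvC_symm (pvC_edge a b))]
      · rw [if_neg hik]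
        obtain ⟨h1, h2, h3⟩ := hsets k hk'
        refine ⟨h1, h2, fun x hx => ?_⟩
        rw [h3 x hx]
        have hxN := pvBInv_mem_nodes hInv' hk' hx
        have hna : ¬ pvC l x a := by
          intro hC
          exact hdisj k i hk' hi (fun h => hik h.symm) a
            (pvBInv_closed hInv' hk' hx haN hC) hai
        exact (pvComp_append_of_not_conn hxN hna (pvC_not_to_nonnode hxN hb)).symm
    · intro x hx
      rcases pvNodes_append.1 hx with hxN | rfl | rfl
      · obtain ⟨i0, hi0, hxi⟩ := hcover x hxN
        refine ⟨i0, by rw [List.length_modify]; exact hi0, ?_⟩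
        rw [List.getElem_modify]
        split
        · exact (PySem.Set.mem_add _ _ _).2 (Or.inl hxi)
        · exact hxi
      · refine ⟨i, by rw [List.length_modify]; exact hi, ?_⟩
        rw [List.getElem_modify, if_pos rfl]
        exact (PySem.Set.mem_add _ _ _).2 (Or.inl hai)
      · refine ⟨i, by rw [List.length_modify]; exact hi, ?_⟩
        rw [List.getElem_modify, if_pos rfl]
        exact (PySem.Set.mem_add _ _ _).2 (Or.inr rfl)
    · intro k1 k2 hk1 hk2 hne x hx1 hx2
      have hl1 : k1 < comps.length := by rw [List.length_modify] at hk1; exact hk1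
      have hl2 : k2 < comps.length := by rw [List.length_modify] at hk2; exact hk2
      rcases hmem' k1 hk1 x hx1 with hx1' | ⟨rfl, rfl⟩
      · rcases hmem' k2 hk2 x hx2 with hx2' | ⟨rfl, rfl⟩
        · exact hdisj k1 k2 hl1 hl2 hne x hx1' hx2'
        · exact hb (pvBInv_mem_nodes hInv' hl1 hx1')
      · rcases hmem' k2 hk2 x hx2 with hx2' | ⟨h, -⟩
        · exact hb (pvBInv_mem_nodes hInv' hl2 hx2')
        · exact hne (h ▸ rfl)
  · -- both endpoints already present
    obtain ⟨hi, hai⟩ := pvFindComp_some hfa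
    obtain ⟨hj, hbj⟩ := pvFindComp_some hfb
    have haN : a ∈ pvNodes l := pvBInv_mem_nodes hInv' hi hai
    have hbN : b ∈ pvNodes l := pvBInv_mem_nodes hInv' hj hbj
    by_cases hij : i = j
    · -- same component: nothing changes
      subst hij
      have hme : pvMergeEdge comps (a, b) = comps := by
        simp [pvMergeEdge, hfa, hfb]
      rw [hme]
      have hab : pvC l a b := pvBInv_conn hInv' hi hai hbj
      have hcomp := pvComp_append_conn haN hbN hab
      refine ⟨?_, ?_, ?_⟩
      · intro k hk
        obtain ⟨h1, h2, h3⟩ := hsets k hk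
        exact ⟨h1, h2, fun x hx => by rw [h3 x hx, hcomp]⟩
      · intro x hx
        rcases pvNodes_append.1 hx with hxN | rfl | rfl
        · exact hcover x hxN
        · exact hcover x haN
        · exact hcover x hbN
      · exact hdisj
    · -- distinct components: union into position i, delete position j
      have hcj : (comps[j]?).getD [] = comps[j] := by
        simp [List.getElem?_eq_getElem hj]
      have hme : pvMergeEdge comps (a, b) =
          (comps.modify i (fun c => PySem.Set.union c comps[j])).eraseIdx j := by
        simp [pvMergeEdge, hfa, hfb, hij, hcj]
      rw [hme]
      have hlen : ((comps.modify i (fun c => PySem.Set.union c comps[j])).eraseIdx j).length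
          = comps.length - 1 := by
        rw [List.length_eraseIdx, List.length_modify]
        simp [hj]
      have hci : comps[i].toFinset = pvComp l a := (hsets i hi).2.2 a hai
      have hcjf : comps[j].toFinset = pvComp l b := (hsets j hj).2.2 b hbj
      have hca' : pvComp (l ++ [(a, b)]) a = pvComp l a ∪ pvComp l b :=
        pvComp_append_merge haN hbN
      have htfS : (PySem.Set.union comps[i] comps[j]).toFinset
          = pvComp (l ++ [(a, b)]) a := by
        ext z
        rw [hca']
        simp [PySem.Set.mem_union, Finset.mem_union, ← hci, ← hcjf]
      have hb1 : ∀ (k : Nat), k < comps.length - 1 →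
          (if k < j then k else k + 1) < comps.length := by
        intro k hk; split <;> omega
      have hgetU : ∀ (k : Nat) (hk : k < comps.length - 1),
          (if k < j then k else k + 1) = i →
          ((comps.modify i (fun c => PySem.Set.union c comps[j])).eraseIdx j)[k]'(by
            rw [hlen]; exact hk) = PySem.Set.union comps[i] comps[j] := by
        intro k hk hik
        rw [List.getElem_eraseIdx]
        split
        · rename_i h'
          rw [if_pos h'] at hik
          subst hik
          rw [List.getElem_modify, if_pos rfl]
        · rename_i h'
          rw [if_neg h'] at hik
          subst hik
          rw [List.getElem_modify, if_pos rfl]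
      have hgetO : ∀ (k : Nat) (hk : k < comps.length - 1) (k' : Nat)
          (hk' : k' < comps.length), (if k < j then k else k + 1) = k' → i ≠ k' →
          ((comps.modify i (fun c => PySem.Set.union c comps[j])).eraseIdx j)[k]'(by
            rw [hlen]; exact hk) = comps[k']'hk' := by
        intro k hk k' hk' heq hik
        subst heq
        rw [List.getElem_eraseIdx]
        split
        · rename_i h'
          simp only [if_pos h'] at hik ⊢
          rw [List.getElem_modify, if_neg hik]
        · rename_i h'
          simp only [if_neg h'] at hik ⊢
          rw [List.getElem_modify, if_neg hik]
      refine ⟨?_, ?_, ?_⟩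
      · intro k hk
        rw [hlen] at hk
        by_cases hik : (if k < j then k else k + 1) = i
        · rw [hgetU k hk hik]
          refine ⟨?_, PySem.Set.nodup_union _ _ (hsets i hi).2.1, ?_⟩
          · intro hnil
            have : a ∈ PySem.Set.union comps[i] comps[j] :=
              (PySem.Set.mem_union _ _ _).2 (Or.inl hai)
            rw [hnil] at this
            exact absurd this List.not_mem_nil
          · intro x hx
            rcases (PySem.Set.mem_union _ _ _).1 hx with hxc | hxc
            · have hxa : pvC l x a := pvBInv_conn hInv' hi hxc hai
              rw [htfS, pvComp_eq_of_C (pvC_mono hxa)]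
            · have hxb : pvC l x b := pvBInv_conn hInv' hj hxc hbj
              have hx'a : pvC (l ++ [(a, b)]) x a :=
                (pvC_mono hxb).trans (pvC_symm (pvC_edge a b))
              rw [htfS, pvComp_eq_of_C hx'a]
        · have hk' := hb1 k hk
          have hkj : (if k < j then k else k + 1) ≠ j := by split <;> omega
          rw [hgetO k hk _ hk' rfl (fun h => hik h.symm)]
          obtain ⟨h1, h2, h3⟩ := hsets _ hk'
          refine ⟨h1, h2, fun x hx => ?_⟩
          rw [h3 x hx]
          have hxN := pvBInv_mem_nodes hInv' hk' hx
          have hna : ¬ pvC l x a := by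
            intro hC
            exact hdisj _ i hk' hi hik a (pvBInv_closed hInv' hk' hx haN hC) hai
          have hnb : ¬ pvC l x b := by
            intro hC
            exact hdisj _ j hk' hj hkj b (pvBInv_closed hInv' hk' hx hbN hC) hbj
          exact (pvComp_append_of_not_conn hxN hna hnb).symm
      · intro x hx
        have hxN : x ∈ pvNodes l := by
          rcases pvNodes_append.1 hx with h | rfl | rfl
          · exact h
          · exact haN
          · exact hbN
        obtain ⟨i0, hi0, hxi⟩ := hcover x hxN
        by_cases hi0j : i0 = j
        · refine ⟨if i < j then i else i - 1, by rw [hlen]; split <;> omega, ?_⟩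
          have hik : (if (if i < j then i else i - 1) < j then (if i < j then i else i - 1)
              else (if i < j then i else i - 1) + 1) = i := by
            split_ifs <;> omega
          rw [hgetU (if i < j then i else i - 1) (by split <;> omega) hik]
          exact (PySem.Set.mem_union _ _ _).2 (Or.inr (hi0j ▸ hxi))
        · refine ⟨if i0 < j then i0 else i0 - 1, by rw [hlen]; split <;> omega, ?_⟩
          have hφ : (if (if i0 < j then i0 else i0 - 1) < j then (if i0 < j then i0 else i0 - 1)
              else (if i0 < j then i0 else i0 - 1) + 1) = i0 := by
            split_ifs <;> omega
          by_cases hii0 : i = i0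
          · rw [hgetU (if i0 < j then i0 else i0 - 1) (by split <;> omega) (by rw [hφ]; exact hii0.symm)]
            exact (PySem.Set.mem_union _ _ _).2 (Or.inl (hii0 ▸ hxi))
          · rw [hgetO (if i0 < j then i0 else i0 - 1) (by split <;> omega) i0 hi0 hφ hii0]
            exact hxi
      · intro k1 k2 hk1 hk2 hne x hx1 hx2
        rw [hlen] at hk1 hk2
        have hmem : ∀ (k : Nat) (hk : k < comps.length - 1) (x : Int),
            x ∈ ((comps.modify i (fun c => PySem.Set.union c comps[j])).eraseIdx j)[k]'(by
              rw [hlen]; exact hk) →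
            x ∈ comps[if k < j then k else k + 1]'(hb1 k hk) ∨
              ((if k < j then k else k + 1) = i ∧ (x ∈ comps[i] ∨ x ∈ comps[j])) := by
          intro k hk y hy
          by_cases hik : (if k < j then k else k + 1) = i
          · rw [hgetU k hk hik] at hy
            exact Or.inr ⟨hik, (PySem.Set.mem_union _ _ _).1 hy⟩
          · rw [hgetO k hk _ (hb1 k hk) rfl (fun h => hik h.symm)] at hy
            exact Or.inl hy
        have hσne : (if k1 < j then k1 else k1 + 1) ≠ (if k2 < j then k2 else k2 + 1) := by
          split <;> split <;> omega
        have hσj : ∀ k, k < comps.length - 1 → (if k < j then k else k + 1) ≠ j := by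
          intro k hk; split <;> omega
        rcases hmem k1 hk1 x hx1 with h1 | ⟨he1, h1⟩ <;>
          rcases hmem k2 hk2 x hx2 with h2 | ⟨he2, h2⟩
        · exact hdisj _ _ (hb1 k1 hk1) (hb1 k2 hk2) hσne x h1 h2
        · rcases h2 with h2 | h2
          · exact hdisj _ i (hb1 k1 hk1) hi (he2 ▸ hσne) x h1 h2
          · exact hdisj _ j (hb1 k1 hk1) hj (hσj k1 hk1) x h1 h2
        · rcases h1 with h1 | h1
          · exact hdisj i _ hi (hb1 k2 hk2) (he1 ▸ hσne) x h1 h2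
          · exact hdisj j _ hj (hb1 k2 hk2) (fun h => (hσj k2 hk2) h.symm) x h1 h2
        · exact hσne (he1.trans he2.symm)

lemma pvBInv_nil : pvBInv [] [] := by
  refine ⟨fun i hi => absurd hi (by simp), fun x hx => absurd hx (by simp [pvNodes]), ?_⟩
  intro i j hi
  exact absurd hi (by simp)

lemma pvB_fold (post : List (Int × Int)) : ∀ (pre : List (Int × Int)) comps,
    pvBInv pre comps → pvBInv (pre ++ post) (post.foldl pvMergeEdge comps) := by
  induction post with
  | nil => intro pre comps h; simpa using h
  | cons e rest ih =>
    intro pre comps h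
    obtain ⟨a, b⟩ := e
    have h1 := pvMergeEdge_inv (a := a) (b := b) h
    have h2 := ih (pre ++ [(a, b)]) _ h1
    simpa [List.append_assoc] using h2

-- MAIN LEMMA for B: the merged sets are exactly the components, each listed once
lemma pvB_main (gb : List (Int × Int)) :
    (∀ c ∈ gb.foldl pvMergeEdge [], c.Nodup) ∧
    pvClassList gb ((gb.foldl pvMergeEdge []).map (fun c => c.toFinset)) := by
  have hInv : pvBInv gb (gb.foldl pvMergeEdge []) := by
    simpa using pvB_fold gb [] [] pvBInv_nil
  set comps := gb.foldl pvMergeEdge [] with hc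
  obtain ⟨hsets, hcover, hdisj⟩ := hInv
  refine ⟨?_, ?_, ?_, ?_⟩
  · intro c hcmem
    obtain ⟨i, hi, rfl⟩ := List.mem_iff_getElem.1 hcmem
    exact (hsets i hi).2.1
  · -- Nodup of the toFinset list
    apply List.pairwise_iff_getElem.2
    intro i j hi hj hij
    simp only [List.length_map] at hi hj
    simp only [List.getElem_map]
    intro heq
    obtain ⟨x, hx⟩ := List.exists_mem_of_ne_nil _ (hsets i hi).1
    have hxj : x ∈ comps[j] := by
      have : x ∈ comps[j].toFinset := heq ▸ List.mem_toFinset.2 hx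
      exact List.mem_toFinset.1 this
    exact hdisj i j hi hj (Nat.ne_of_lt hij) x hx hxj
  · intro c hcmem
    obtain ⟨d, hd, rfl⟩ := List.mem_map.1 hcmem
    obtain ⟨i, hi, rfl⟩ := List.mem_iff_getElem.1 hd
    obtain ⟨x, hx⟩ := List.exists_mem_of_ne_nil _ (hsets i hi).1
    exact ⟨x, pvBInv_mem_nodes ⟨hsets, hcover, hdisj⟩ hi hx, (hsets i hi).2.2 x hx⟩
  · intro x hx
    obtain ⟨i, hi, hxi⟩ := hcover x hx
    refine List.mem_map.2 ⟨comps[i], comps.getElem_mem hi, ?_⟩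
    exact (hsets i hi).2.2 x hxi

-- ===== A-side: the adjacency dict is the edge relation =====
lemma pvMem_nodes_iff {gb : List (Int × Int)} {n : Int} :
    n ∈ pvNodes gb ↔ ∃ y, pvE gb n y := by
  constructor
  · intro h
    simp only [pvNodes, List.mem_toFinset, List.mem_flatMap] at h
    obtain ⟨e, he, hn⟩ := h
    simp only [List.mem_cons, List.not_mem_nil, or_false] at hn
    rcases hn with h1 | h1
    · exact ⟨e.2, Or.inl (by rw [h1]; simpa using he)⟩
    · exact ⟨e.1, Or.inr (by rw [h1]; simpa using he)⟩
  · rintro ⟨y, h⟩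
    exact pvE_mem_left h

def pvAdjOK (E' : Int → Int → Prop) (g : PySem.Dict Int (PySem.Set Int)) : Prop :=
  g.keys.Nodup ∧ (∀ n : Int, n ∈ g.keys ↔ ∃ y, E' n y) ∧
  (∀ (n : Int) (s : PySem.Set Int), g.get? n = some s → s.Nodup ∧ ∀ y : Int, y ∈ s ↔ E' n y) ∧
  (∀ n : Int, g.get? n = none → ∀ y : Int, ¬ E' n y)

lemma pvAddNbr_adj {E' : Int → Int → Prop} {g : PySem.Dict Int (PySem.Set Int)}
    (h : pvAdjOK E' g) (u v : Int) :
    pvAdjOK (fun n y => E' n y ∨ (n = u ∧ y = v)) (pvAddNbr g u v) := by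
  obtain ⟨h1, h2, h3, h4⟩ := h
  have hget : ∀ x : Int, (pvAddNbr g u v).get? x =
      if x = u then
        some (match g.get? u with
          | some s => PySem.Set.add s v
          | none => PySem.Set.ofList [v])
      else g.get? x := by
    intro x
    unfold pvAddNbr
    cases hu : g.get? u <;> simp only [hu] <;> rw [PySem.Dict.get?_insert]
  have hkeys : ∀ x : Int, x ∈ (pvAddNbr g u v).keys ↔ x = u ∨ x ∈ g.keys := by
    intro x
    unfold pvAddNbr
    cases hu : g.get? u <;> simp only [hu] <;> exact PySem.Dict.mem_keys_insert _ _ _ _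
  refine ⟨?_, ?_, ?_, ?_⟩
  · unfold pvAddNbr
    cases hu : g.get? u <;> exact PySem.Dict.nodup_keys_insert _ _ _ h1
  · intro n
    rw [hkeys n]
    constructor
    · rintro (rfl | hn)
      · exact ⟨v, Or.inr ⟨rfl, rfl⟩⟩
      · obtain ⟨y, hy⟩ := (h2 n).1 hn
        exact ⟨y, Or.inl hy⟩
    · rintro ⟨y, hy | ⟨rfl, rfl⟩⟩
      · exact Or.inr ((h2 n).2 ⟨y, hy⟩)
      · exact Or.inl rfl
  · intro n s hs
    rw [hget n] at hs
    by_cases hn : n = u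
    · rw [if_pos hn] at hs
      subst hn
      cases hu : g.get? n with
      | some s0 =>
        rw [hu] at hs
        obtain ⟨hs0nodup, hs0mem⟩ := h3 n s0 hu
        cases hs
        refine ⟨PySem.Set.nodup_add _ _ hs0nodup, fun y => ?_⟩
        rw [PySem.Set.mem_add]
        constructor
        · rintro (hy | rfl)
          · exact Or.inl ((hs0mem y).1 hy)
          · exact Or.inr ⟨rfl, rfl⟩
        · rintro (hy | ⟨-, rfl⟩)
          · exact Or.inl ((hs0mem y).2 hy)
          · exact Or.inr rfl
      | none =>
        rw [hu] at hs
        cases hs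
        refine ⟨PySem.Set.nodup_ofList _, fun y => ?_⟩
        rw [PySem.Set.mem_ofList]
        constructor
        · intro hy
          simp only [List.mem_cons, List.not_mem_nil, or_false] at hy
          exact Or.inr ⟨rfl, hy⟩
        · rintro (hy | ⟨-, rfl⟩)
          · exact absurd hy (h4 n hu y)
          · simp
    · rw [if_neg hn] at hs
      obtain ⟨hnodup, hmem⟩ := h3 n s hs
      refine ⟨hnodup, fun y => ?_⟩
      rw [hmem y]
      constructor
      · exact Or.inl
      · rintro (hy | ⟨rfl, rfl⟩)
        · exact hy
        · exact absurd rfl hn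
  · intro n hn y
    rw [hget n] at hn
    by_cases hnu : n = u
    · rw [if_pos hnu] at hn
      cases hn
    · rw [if_neg hnu] at hn
      rintro (hy | ⟨rfl, rfl⟩)
      · exact h4 n hn y hy
      · exact hnu rfl

lemma pvAdjOK_congr {E1 E2 : Int → Int → Prop} {g : PySem.Dict Int (PySem.Set Int)}
    (h : ∀ n y, E1 n y ↔ E2 n y) (hA : pvAdjOK E1 g) : pvAdjOK E2 g := by
  obtain ⟨h1, h2, h3, h4⟩ := hA
  refine ⟨h1, fun n => ?_, fun n s hs => ?_, fun n hn y hy => ?_⟩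
  · rw [h2 n]
    exact exists_congr (fun y => h n y)
  · obtain ⟨ha, hb⟩ := h3 n s hs
    exact ⟨ha, fun y => (hb y).trans (h n y)⟩
  · exact h4 n hn y ((h n y).2 hy)

lemma pvBuildGraph_adj (gb : List (Int × Int)) : pvAdjOK (pvE gb) (pvBuildGraph gb) := by
  induction gb using List.reverseRecOn with
  | nil =>
    rw [show pvBuildGraph [] = PySem.Dict.empty from rfl]
    refine ⟨PySem.Dict.nodup_keys_empty, fun n => ?_, fun n s hs => ?_, fun n hn y hy => ?_⟩
    · simp [PySem.Dict.keys_empty, pvE]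
    · rw [PySem.Dict.get?_empty] at hs
      cases hs
    · rcases hy with h | h <;> exact absurd h (List.not_mem_nil)
  | append_singleton l e ih =>
    obtain ⟨a, b⟩ := e
    have hfold : pvBuildGraph (l ++ [(a, b)]) =
        pvAddNbr (pvAddNbr (pvBuildGraph l) a b) b a := by
      unfold pvBuildGraph
      rw [List.foldl_append]
      rfl
    rw [hfold]
    have hA1 := pvAddNbr_adj ih a b
    have hA2 := pvAddNbr_adj hA1 b a
    refine pvAdjOK_congr (fun n y => ?_) hA2
    rw [pvE_append]
    tauto

-- degree and size bounds for the fuel argument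
def pvDeg (g : PySem.Dict Int (PySem.Set Int)) (n : Int) : Nat := ((g.get? n).getD []).length

lemma pvNodes_card_le (gb : List (Int × Int)) : (pvNodes gb).card ≤ 2 * gb.length := by
  have hlen : (gb.flatMap (fun e => [e.1, e.2])).length = 2 * gb.length := by
    induction gb with
    | nil => rfl
    | cons e t iht => simp only [List.flatMap_cons, List.length_append, List.length_cons,
        List.length_nil, List.length_cons, iht]; omega
  calc (pvNodes gb).card ≤ (gb.flatMap (fun e => [e.1, e.2])).length :=
        List.toFinset_card_le _
    _ = 2 * gb.length := hlen

lemma pvDeg_le {gb : List (Int × Int)} {g : PySem.Dict Int (PySem.Set Int)}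
    (hg : pvAdjOK (pvE gb) g) (n : Int) : pvDeg g n ≤ 2 * gb.length := by
  unfold pvDeg
  cases hs : g.get? n with
  | none => simp
  | some s =>
    obtain ⟨hnodup, hmem⟩ := hg.2.2.1 n s hs
    simp only [Option.getD_some]
    calc s.length = s.toFinset.card := (List.toFinset_card_of_nodup hnodup).symm
      _ ≤ (pvNodes gb).card := Finset.card_le_card (fun y hy =>
            pvE_mem_right ((hmem y).1 (List.mem_toFinset.1 hy)))
      _ ≤ 2 * gb.length := pvNodes_card_le gb

lemma pvClosed_reach {gb : List (Int × Int)} {visited : PySem.Set Int} {root z : Int}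
    (hclosed : ∀ x ∈ visited, ∀ y, pvE gb x y → y ∈ visited)
    (hroot : root ∈ visited) (h : pvC gb root z) : z ∈ visited := by
  induction h with
  | refl => exact hroot
  | tail _ hE ih => exact hclosed _ ih _ hE

-- ===== A-side: the while loop visits exactly the component of its root =====
lemma pvDfsA_run {gb : List (Int × Int)} {g : PySem.Dict Int (PySem.Set Int)}
    (hg : pvAdjOK (pvE gb) g) {root : Int} :
    ∀ (fuel : Nat) (stack : List Int) (visited : PySem.Set Int) (cluster : Int)
      (counter : List Int),
    visited.Nodup →
    (∀ x ∈ stack, x ∈ pvComp gb root) →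
    (∀ x ∈ visited, ∀ y, pvE gb x y → y ∈ visited ∨ y ∈ stack) →
    (root ∈ visited ∨ root ∈ stack) →
    0 ≤ cluster → cluster.toNat < counter.length →
    stack.length + ((pvComp gb root \ visited.toFinset).sum fun m => 1 + pvDeg g m) ≤ fuel →
    ∃ v' : PySem.Set Int,
      pvDfsA g fuel stack visited cluster counter =
        (v', PySem.List.pySetD counter cluster (PySem.List.pyGetD counter cluster 0 +
          (((pvComp gb root \ visited.toFinset).card : Nat) : Int))) ∧
      v'.Nodup ∧ (∀ x : Int, x ∈ v' ↔ x ∈ visited ∨ x ∈ pvComp gb root) := by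
  intro fuel
  induction fuel using Nat.strong_induction_on with
  | _ fuel IH =>
  intro stack visited cluster counter hnodup hstack hclosed hroot hcl0 hclb hfuel
  rcases List.eq_nil_or_concat stack with rfl | ⟨s, n, rfl⟩
  · -- stack is empty: the loop exits; everything reachable is already visited
    have hvroot : root ∈ visited := by
      rcases hroot with h | h
      · exact h
      · exact absurd h (List.not_mem_nil)
    have hclosed' : ∀ x ∈ visited, ∀ y, pvE gb x y → y ∈ visited := by
      intro x hx y hy
      rcases hclosed x hx y hy with h | h
      · exact h
      · exact absurd h (List.not_mem_nil)
    have hsubset : pvComp gb root ⊆ visited.toFinset := fun z hz =>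
      List.mem_toFinset.2 (pvClosed_reach hclosed' hvroot (mem_pvComp.1 hz).2)
    have hsub : pvComp gb root \ visited.toFinset = ∅ :=
      Finset.sdiff_eq_empty_iff_subset.2 hsubset
    have hrun : pvDfsA g fuel [] visited cluster counter = (visited, counter) := by
      cases fuel <;> rfl
    obtain ⟨m, hm⟩ : ∃ m : Nat, cluster = (m : Int) :=
      ⟨cluster.toNat, (Int.toNat_of_nonneg hcl0).symm⟩
    subst hm
    have hmlen : m < counter.length := by simpa using hclb
    have hcounter : PySem.List.pySetD counter (m : Int)
        (PySem.List.pyGetD counter (m : Int) 0 +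
          (((pvComp gb root \ visited.toFinset).card : Nat) : Int)) = counter := by
      rw [hsub]
      simp only [Finset.card_empty, Nat.cast_zero, add_zero,
        PySem.List.pyGetD_natCast, PySem.List.pySetD_natCast]
      rw [List.getD_eq_getElem _ _ hmlen, List.set_getElem_self]
    refine ⟨visited, ?_, hnodup, fun x => ?_⟩
    · rw [hrun, hcounter]
    · constructor
      · exact Or.inl
      · rintro (h | h)
        · exact h
        · exact List.mem_toFinset.1 (hsubset h)
  · -- stack = s ++ [n]: pop n
    simp only [List.concat_eq_append] at hstack hclosed hroot hfuel ⊢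
    have hfuelpos : 1 ≤ fuel := by
      simp only [List.length_append, List.length_cons, List.length_nil] at hfuel
      omega
    obtain ⟨fuel', rfl⟩ : ∃ f', fuel = f' + 1 := ⟨fuel - 1, by omega⟩
    simp only [pvDfsA, PySem.List.pop?_last]
    by_cases hvn : PySem.Set.contains visited n = true
    · rw [if_pos hvn]
      have hnv : n ∈ visited := (PySem.Set.contains_iff _ _).1 hvn
      have hcl2 : ∀ x ∈ visited, ∀ y, pvE gb x y → y ∈ visited ∨ y ∈ s := by
        intro x hx y hy
        rcases hclosed x hx y hy with h | h
        · exact Or.inl h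
        · rcases List.mem_append.1 h with h | h
          · exact Or.inr h
          · simp only [List.mem_cons, List.not_mem_nil, or_false] at h
            exact Or.inl (h ▸ hnv)
      have hrt2 : root ∈ visited ∨ root ∈ s := by
        rcases hroot with h | h
        · exact Or.inl h
        · rcases List.mem_append.1 h with h | h
          · exact Or.inr h
          · simp only [List.mem_cons, List.not_mem_nil, or_false] at h
            exact Or.inl (h ▸ hnv)
      have hfl2 : s.length +
          ((pvComp gb root \ visited.toFinset).sum fun m => 1 + pvDeg g m) ≤ fuel' := by
        simp only [List.length_append, List.length_cons, List.length_nil] at hfuel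
        omega
      exact IH fuel' (by omega) s visited cluster counter hnodup
        (fun x hx => hstack x (List.mem_append.2 (Or.inl hx))) hcl2 hrt2 hcl0 hclb hfl2
    · rw [if_neg hvn]
      have hnmem : n ∉ visited := fun h => hvn ((PySem.Set.contains_iff _ _).2 h)
      have hncomp : n ∈ pvComp gb root := hstack n (List.mem_append.2 (Or.inr (by simp)))
      have hnN : n ∈ pvNodes gb := pvComp_subset_nodes hncomp
      obtain ⟨nbrs, hnbrs⟩ : ∃ s0, g.get? n = some s0 := by
        cases hs : g.get? n with
        | none =>
          obtain ⟨y, hy⟩ := pvMem_nodes_iff.1 hnN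
          exact absurd hy (hg.2.2.2 n hs y)
        | some s0 => exact ⟨s0, rfl⟩
      rw [hnbrs]
      simp only []
      obtain ⟨hnbrs_nodup, hnbrs_mem⟩ := hg.2.2.1 n nbrs hnbrs
      have hv'mem : ∀ x : Int, x ∈ PySem.Set.add visited n ↔ x ∈ visited ∨ x = n :=
        fun x => PySem.Set.mem_add _ _ _
      have hv'nodup : (PySem.Set.add visited n).Nodup := PySem.Set.nodup_add _ _ hnodup
      have hv'toF : (PySem.Set.add visited n).toFinset = insert n visited.toFinset := by
        ext z
        simp only [List.mem_toFinset, hv'mem z, Finset.mem_insert]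
        tauto
      have hnT : n ∈ pvComp gb root \ visited.toFinset :=
        Finset.mem_sdiff.2 ⟨hncomp, fun h => hnmem (List.mem_toFinset.1 h)⟩
      have hT' : pvComp gb root \ (PySem.Set.add visited n).toFinset =
          (pvComp gb root \ visited.toFinset).erase n := by
        rw [hv'toF, Finset.sdiff_insert]
      have hsum : ((pvComp gb root \ visited.toFinset).sum fun m => 1 + pvDeg g m) =
          (1 + pvDeg g n) +
            (((pvComp gb root \ visited.toFinset).erase n).sum fun m => 1 + pvDeg g m) :=
        (Finset.add_sum_erase _ _ hnT).symm
      have hdeglen : pvDeg g n = nbrs.length := by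
        unfold pvDeg
        rw [hnbrs]
        rfl
      have hdifflen : (PySem.Set.diff nbrs (PySem.Set.add visited n)).length ≤ nbrs.length :=
        List.length_filter_le _ _
      have hst' : ∀ x ∈ s ++ PySem.Set.diff nbrs (PySem.Set.add visited n),
          x ∈ pvComp gb root := by
        intro x hx
        rcases List.mem_append.1 hx with h | h
        · exact hstack x (List.mem_append.2 (Or.inl h))
        · have hxnbrs : x ∈ nbrs := ((PySem.Set.mem_diff _ _ _).1 h).1
          have hEnx : pvE gb n x := (hnbrs_mem x).1 hxnbrs
          exact mem_pvComp.2 ⟨pvE_mem_right hEnx, ((mem_pvComp.1 hncomp).2).tail hEnx⟩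
      have hcl' : ∀ x ∈ PySem.Set.add visited n, ∀ y, pvE gb x y →
          y ∈ PySem.Set.add visited n ∨ y ∈ s ++ PySem.Set.diff nbrs (PySem.Set.add visited n) := by
        intro x hx y hy
        rcases (hv'mem x).1 hx with hxv | hxn
        · rcases hclosed x hxv y hy with h | h
          · exact Or.inl ((hv'mem y).2 (Or.inl h))
          · rcases List.mem_append.1 h with h | h
            · exact Or.inr (List.mem_append.2 (Or.inl h))
            · simp only [List.mem_cons, List.not_mem_nil, or_false] at h
              exact Or.inl ((hv'mem y).2 (Or.inr h))
        · have hynbrs : y ∈ nbrs := (hnbrs_mem y).2 (hxn ▸ hy)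
          by_cases hyv : y ∈ PySem.Set.add visited n
          · exact Or.inl hyv
          · exact Or.inr (List.mem_append.2 (Or.inr ((PySem.Set.mem_diff _ _ _).2 ⟨hynbrs, hyv⟩)))
      have hrt' : root ∈ PySem.Set.add visited n ∨
          root ∈ s ++ PySem.Set.diff nbrs (PySem.Set.add visited n) := by
        rcases hroot with h | h
        · exact Or.inl ((hv'mem root).2 (Or.inl h))
        · rcases List.mem_append.1 h with h | h
          · exact Or.inr (List.mem_append.2 (Or.inl h))
          · simp only [List.mem_cons, List.not_mem_nil, or_false] at h
            exact Or.inl ((hv'mem root).2 (Or.inr h))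
      have hclb' : cluster.toNat < (PySem.List.pySetD counter cluster
          (PySem.List.pyGetD counter cluster 0 + 1)).length := by
        rw [PySem.List.length_pySetD]
        exact hclb
      have hfl' : (s ++ PySem.Set.diff nbrs (PySem.Set.add visited n)).length +
          ((pvComp gb root \ (PySem.Set.add visited n).toFinset).sum fun m => 1 + pvDeg g m)
          ≤ fuel' := by
        rw [hT']
        rw [List.length_append] at hfuel ⊢
        simp only [List.length_cons, List.length_nil] at hfuel
        omega
      obtain ⟨v', heq, hvnodup', hvmem'⟩ := IH fuel' (by omega)
        (s ++ PySem.Set.diff nbrs (PySem.Set.add visited n)) (PySem.Set.add visited n) cluster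
        (PySem.List.pySetD counter cluster (PySem.List.pyGetD counter cluster 0 + 1))
        hv'nodup hst' hcl' hrt' hcl0 hclb' hfl'
      refine ⟨v', ?_, hvnodup', fun x => ?_⟩
      · rw [heq, hT']
        obtain ⟨m, hm⟩ : ∃ m : Nat, cluster = (m : Int) :=
          ⟨cluster.toNat, (Int.toNat_of_nonneg hcl0).symm⟩
        subst hm
        have hmlen : m < counter.length := by simpa using hclb
        have hTpos : 1 ≤ (pvComp gb root \ visited.toFinset).card :=
          Finset.card_pos.2 ⟨n, hnT⟩
        simp only [PySem.List.pyGetD_natCast, PySem.List.pySetD_natCast]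
        rw [Finset.card_erase_of_mem hnT]
        have hget2 : (counter.set m (counter.getD m 0 + 1)).getD m 0 = counter.getD m 0 + 1 := by
          rw [List.getD_eq_getElem _ _ (by rw [List.length_set]; exact hmlen)]
          rw [List.getElem_set_self]
        rw [hget2, List.set_set]
        congr 1
        push_cast [Nat.cast_sub hTpos]
        ring
      · rw [hvmem' x, hv'mem x]
        constructor
        · rintro ((h | h) | h)
          · exact Or.inl h
          · exact Or.inr (h ▸ hncomp)
          · exact Or.inr h
        · rintro (h | h)
          · exact Or.inl (Or.inl h)
          · exact Or.inr h

-- the outer 'for node in graph:' loop, one component per unvisited key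
lemma pvOuter_fold {gb : List (Int × Int)} {g : PySem.Dict Int (PySem.Set Int)}
    (hg : pvAdjOK (pvE gb) g) {fuel : Nat}
    (hfuel : (2 * gb.length + 2) * (2 * gb.length + 2) + 1 ≤ fuel) :
    ∀ (rest : List Int) (visited : PySem.Set Int) (cluster : Int) (counter : List Int)
      (roots : List Int),
    (∀ k ∈ rest, k ∈ pvNodes gb) →
    visited.Nodup →
    (∀ x ∈ visited, ∀ y, pvE gb x y → y ∈ visited) →
    (∀ x : Int, x ∈ visited ↔ ∃ r ∈ roots, x ∈ pvComp gb r) →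
    counter = roots.map (fun r => ((pvComp gb r).card : Int)) →
    cluster = (counter.length : Int) →
    (∀ r ∈ roots, r ∈ pvNodes gb) →
    (roots.map (pvComp gb)).Nodup →
    ∃ (roots' : List Int) (v' : PySem.Set Int) (cl' : Int),
      rest.foldl (pvOuterStep g fuel) (visited, cluster, counter) =
        (v', cl', roots'.map (fun r => ((pvComp gb r).card : Int))) ∧
      (∃ ext, roots' = roots ++ ext) ∧
      (∀ x : Int, x ∈ v' ↔ ∃ r ∈ roots', x ∈ pvComp gb r) ∧
      (∀ r ∈ roots', r ∈ pvNodes gb) ∧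
      (roots'.map (pvComp gb)).Nodup ∧
      (∀ k ∈ rest, k ∈ v') := by
  intro rest
  induction rest with
  | nil =>
    intro visited cluster counter roots hrest hnodup hclosed hmem hcounter hcluster hrootsN hrootsD
    exact ⟨roots, visited, cluster, by simp [hcounter], ⟨[], by simp⟩, hmem, hrootsN, hrootsD,
      by simp⟩
  | cons k rest ih =>
    intro visited cluster counter roots hrest hnodup hclosed hmem hcounter hcluster hrootsN hrootsD
    have hkN : k ∈ pvNodes gb := hrest k (by simp)
    rw [List.foldl_cons]
    by_cases hkv : PySem.Set.contains visited k = true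
    · -- node already visited: the state is unchanged
      have hstep : pvOuterStep g fuel (visited, cluster, counter) k =
          (visited, cluster, counter) := by
        unfold pvOuterStep
        rw [if_pos hkv]
      rw [hstep]
      obtain ⟨roots', v', cl', h1, ⟨ext, hext⟩, h2, h3, h4, h5⟩ :=
        ih visited cluster counter roots (fun k' hk' => hrest k' (by simp [hk'])) hnodup
          hclosed hmem hcounter hcluster hrootsN hrootsD
      refine ⟨roots', v', cl', h1, ⟨ext, hext⟩, h2, h3, h4, ?_⟩
      intro k' hk'
      rcases List.mem_cons.1 hk' with h | hk'
      · have hkvis : k' ∈ visited := h ▸ (PySem.Set.contains_iff _ _).1 hkv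
        obtain ⟨r, hr, hkr⟩ := (hmem k').1 hkvis
        exact (h2 k').2 ⟨r, by rw [hext]; exact List.mem_append.2 (Or.inl hr), hkr⟩
      · exact h5 k' hk'
    · -- fresh node: run the DFS, visiting exactly its component
      have hknv : k ∉ visited := fun h => hkv ((PySem.Set.contains_iff _ _).2 h)
      have hdisjk : pvComp gb k \ visited.toFinset = pvComp gb k := by
        ext z
        simp only [Finset.mem_sdiff, List.mem_toFinset]
        constructor
        · exact fun h => h.1
        · intro hz
          refine ⟨hz, fun hzv => ?_⟩
          obtain ⟨r, hr, hzr⟩ := (hmem z).1 hzv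
          have hC : pvC gb r k := pvC_trans (mem_pvComp.1 hzr).2 (pvC_symm (mem_pvComp.1 hz).2)
          have : k ∈ visited := (hmem k).2 ⟨r, hr, mem_pvComp.2 ⟨hkN, hC⟩⟩
          exact hknv this
      have hfuel0 : ([k] : List Int).length +
          ((pvComp gb k \ visited.toFinset).sum fun m => 1 + pvDeg g m) ≤ fuel := by
        rw [hdisjk]
        have hb : ∀ m ∈ pvComp gb k, 1 + pvDeg g m ≤ 1 + 2 * gb.length := fun m _ =>
          Nat.add_le_add_left (pvDeg_le hg m) 1
        have hsum := Finset.sum_le_card_nsmul _ _ _ hb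
        rw [smul_eq_mul] at hsum
        have hcard : (pvComp gb k).card ≤ 2 * gb.length :=
          le_trans (Finset.card_le_card pvComp_subset_nodes) (pvNodes_card_le gb)
        have hmul : (pvComp gb k).card * (1 + 2 * gb.length) ≤
            2 * gb.length * (1 + 2 * gb.length) := Nat.mul_le_mul_right _ hcard
        have he1 : (2 * gb.length + 2) * (2 * gb.length + 2) =
            4 * (gb.length * gb.length) + 8 * gb.length + 4 := by ring
        have he2 : 2 * gb.length * (1 + 2 * gb.length) =
            2 * gb.length + 4 * (gb.length * gb.length) := by ring
        simp only [List.length_cons, List.length_nil]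
        omega
      obtain ⟨v', heq, hvnodup', hvmem'⟩ := pvDfsA_run hg (root := k) fuel [k] visited cluster
        (counter ++ [0]) hnodup
        (fun x hx => by
          simp only [List.mem_cons, List.not_mem_nil, or_false] at hx
          rw [hx]
          exact self_mem_pvComp hkN)
        (fun x hx y hy => Or.inl (hclosed x hx y hy))
        (Or.inr (by simp))
        (by rw [hcluster]; exact Int.natCast_nonneg _)
        (by rw [hcluster]; simp)
        hfuel0
      have hstep : pvOuterStep g fuel (visited, cluster, counter) k =
          (v', cluster + 1, counter ++ [(((pvComp gb k).card : Nat) : Int)]) := by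
        unfold pvOuterStep
        rw [if_neg hkv]
        simp only []
        rw [heq, hdisjk, hcluster]
        rw [PySem.List.pyGetD_natCast, PySem.List.pySetD_natCast]
        simp
      rw [hstep]
      have hext_mem : ∀ x : Int, x ∈ v' ↔ ∃ r ∈ roots ++ [k], x ∈ pvComp gb r := by
        intro x
        rw [hvmem' x]
        constructor
        · rintro (h | h)
          · obtain ⟨r, hr, hxr⟩ := (hmem x).1 h
            exact ⟨r, List.mem_append.2 (Or.inl hr), hxr⟩
          · exact ⟨k, List.mem_append.2 (Or.inr (by simp)), h⟩
        · rintro ⟨r, hr, hxr⟩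
          rcases List.mem_append.1 hr with hr | hr
          · exact Or.inl ((hmem x).2 ⟨r, hr, hxr⟩)
          · simp only [List.mem_cons, List.not_mem_nil, or_false] at hr
            exact Or.inr (hr ▸ hxr)
      have hclosed' : ∀ x ∈ v', ∀ y, pvE gb x y → y ∈ v' := by
        intro x hx y hy
        rcases (hvmem' x).1 hx with h | h
        · exact (hvmem' y).2 (Or.inl (hclosed x h y hy))
        · exact (hvmem' y).2 (Or.inr (mem_pvComp.2
            ⟨pvE_mem_right hy, (mem_pvComp.1 h).2.tail hy⟩))
      have hrootsD' : ((roots ++ [k]).map (pvComp gb)).Nodup := by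
        rw [List.map_append, List.nodup_append]
        refine ⟨hrootsD, by simp, ?_⟩
        intro c hc c' hc'
        simp only [List.map_cons, List.map_nil, List.mem_cons, List.not_mem_nil, or_false] at hc'
        subst hc'
        obtain ⟨r, hr, hrc⟩ := List.mem_map.1 hc
        intro hcontra
        have hkc : k ∈ pvComp gb r := by
          rw [hrc, hcontra]
          exact self_mem_pvComp hkN
        exact hknv ((hmem k).2 ⟨r, hr, hkc⟩)
      obtain ⟨roots', v'', cl'', h1, ⟨ext, hext⟩, h2, h3, h4, h5⟩ :=
        ih v' (cluster + 1) (counter ++ [(((pvComp gb k).card : Nat) : Int)]) (roots ++ [k])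
          (fun k' hk' => hrest k' (by simp [hk'])) hvnodup' hclosed' hext_mem
          (by rw [hcounter, List.map_append]; rfl)
          (by rw [hcluster]; simp)
          (fun r hr => by
            rcases List.mem_append.1 hr with hr | hr
            · exact hrootsN r hr
            · simp only [List.mem_cons, List.not_mem_nil, or_false] at hr
              exact hr ▸ hkN)
          hrootsD'
      refine ⟨roots', v'', cl'', h1, ⟨[k] ++ ext, by rw [hext, List.append_assoc]⟩, h2, h3, h4, ?_⟩
      intro k' hk'
      rcases List.mem_cons.1 hk' with h | hk'
      · refine (h2 k').2 ⟨k, ?_, by rw [h]; exact self_mem_pvComp hkN⟩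
        rw [hext]
        exact List.mem_append.2 (Or.inl (List.mem_append.2 (Or.inr (by simp))))
      · exact h5 k' hk'

-- MAIN LEMMA for A: the counter list holds the component sizes, one entry per component
lemma pvA_main (gb : List (Int × Int)) (fuel : Nat)
    (hfuel : (2 * gb.length + 2) * (2 * gb.length + 2) + 1 ≤ fuel) :
    ∃ roots : List Int,
      ((PySem.Dict.keys (pvBuildGraph gb)).foldl (pvOuterStep (pvBuildGraph gb) fuel)
        (PySem.Set.empty, (0:Int), ([] : List Int))).2.2
        = roots.map (fun r => ((pvComp gb r).card : Int)) ∧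
      pvClassList gb (roots.map (pvComp gb)) := by
  have hg := pvBuildGraph_adj gb
  obtain ⟨roots', v', cl', h1, -, hmem', hrootsN, hrootsD, hcov⟩ :=
    pvOuter_fold hg hfuel (pvBuildGraph gb).keys PySem.Set.empty 0 [] []
      (fun k hk => by
        obtain ⟨y, hy⟩ := (hg.2.1 k).1 hk
        exact pvE_mem_left hy)
      List.nodup_nil
      (fun x hx => absurd hx List.not_mem_nil)
      (fun x => ⟨fun hx => absurd hx List.not_mem_nil,
        fun h => by obtain ⟨r, hr, -⟩ := h; exact absurd hr List.not_mem_nil⟩)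
      rfl rfl
      (fun r hr => absurd hr List.not_mem_nil)
      List.nodup_nil
  refine ⟨roots', by rw [h1], ?_, ?_, ?_⟩
  · exact hrootsD
  · intro c hc
    obtain ⟨r, hr, hrc⟩ := List.mem_map.1 hc
    exact ⟨r, hrootsN r hr, hrc.symm⟩
  · intro x hx
    have hxk : x ∈ (pvBuildGraph gb).keys := (hg.2.1 x).2 (pvMem_nodes_iff.1 hx)
    obtain ⟨r, hr, hxr⟩ := (hmem' x).1 (hcov x hxk)
    have : pvComp gb r = pvComp gb x := pvComp_eq_of_C (mem_pvComp.1 hxr).2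
    exact List.mem_map.2 ⟨r, hr, this⟩

-- ===== VERDICT (by name: the statement is the Claim_ definition above) =====
theorem componentsInGraph_spec : Claim_equal_componentsInGraph := by
  intro gb _ _
  unfold Spec_componentsInGraph
  obtain ⟨roots, hA, hLa⟩ := pvA_main gb _ le_rfl
  obtain ⟨hBnodup, hLb⟩ := pvB_main gb
  have hperm : ((PySem.Dict.keys (pvBuildGraph gb)).foldl
      (pvOuterStep (pvBuildGraph gb) ((2 * gb.length + 2) * (2 * gb.length + 2) + 1))
      (PySem.Set.empty, (0:Int), ([] : List Int))).2.2.Perm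
      ((gb.foldl pvMergeEdge []).map (fun c => (PySem.Set.len c : Int))) := by
    rw [hA]
    have hmapA : roots.map (fun r => ((pvComp gb r).card : Int))
        = (roots.map (pvComp gb)).map (fun f => ((f.card : Nat) : Int)) := by
      rw [List.map_map]; rfl
    have hmapB : (gb.foldl pvMergeEdge []).map (fun c => (PySem.Set.len c : Int))
        = ((gb.foldl pvMergeEdge []).map (fun c => c.toFinset)).map
            (fun f => ((f.card : Nat) : Int)) := by
      rw [List.map_map]
      refine List.map_congr_left (fun c hc => ?_)
      simp only [Function.comp]
      rw [List.toFinset_card_of_nodup (hBnodup c hc)]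
      rfl
    rw [hmapA, hmapB]
    exact (pvClassList_perm hLa hLb).map _
  show componentsInGraph gb = componentsInGraph_alt gb
  simp only [componentsInGraph, componentsInGraph_alt]
  rw [pvMin?_perm hperm, pvMax?_perm hperm]
  cases PySem.List.min? ((gb.foldl pvMergeEdge []).map (fun c => (PySem.Set.len c : Int)))
      (fun x => x) <;>
    cases PySem.List.max? ((gb.foldl pvMergeEdge []).map (fun c => (PySem.Set.len c : Int)))
      (fun x => x) <;> rfl
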